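-- pv_equiv track=rewrite | github.com/LegitStack/maestro | maestro/core/transition.py | indices_to_trans
-- ===== SOURCE A (Python) =====
-- def indices_to_trans(indices, ln):
--     trans = []
--     for each in range(0,ln):
--         if each in indices:
--             trans.append(1)
--         else:
--             trans.append(0)
--     return trans
-- ===== SOURCE B (Python) =====
-- def indices_to_trans(indices, ln):
--     trans = [0] * ln
--     for i in indices:
--         if 0 <= i < ln:
--             trans[i] = 1
--     return trans
-- ===== Notes on version B (the rewrite author's own statement) =====
-- stated objective: faster
-- what changed: Replaces the scan over range(ln) with an 'in indices' membership test at each slot by a preallocated zero list with a single scatter pass over indices (trans[i]=1 for in-range i).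
import Mathlib
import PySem

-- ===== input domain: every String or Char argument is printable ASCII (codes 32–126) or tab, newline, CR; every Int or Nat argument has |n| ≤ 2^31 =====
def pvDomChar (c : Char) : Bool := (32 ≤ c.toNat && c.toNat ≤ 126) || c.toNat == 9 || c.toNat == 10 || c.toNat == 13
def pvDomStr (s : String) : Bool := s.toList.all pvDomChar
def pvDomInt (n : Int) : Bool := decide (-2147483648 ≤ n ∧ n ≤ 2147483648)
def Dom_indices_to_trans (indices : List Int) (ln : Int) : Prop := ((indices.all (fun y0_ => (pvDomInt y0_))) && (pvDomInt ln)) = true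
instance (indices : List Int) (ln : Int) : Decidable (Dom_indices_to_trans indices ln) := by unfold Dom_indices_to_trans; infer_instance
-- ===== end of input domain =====

-- B replaces A's scan over range(ln) with an 'in indices' test per slot by a preallocated
-- zero list and a single scatter pass over indices (faster when both are large).

-- ===== PORT A =====
-- A: trans = []; for each in range(0, ln): append 1 if each in indices else 0
def indices_to_trans (indices : List Int) (ln : Int) : List Int :=
  (PySem.List.pyRange 0 ln 1).foldl
    (fun trans each => trans ++ [if each ∈ indices then 1 else 0]) []

-- ===== PORT B =====
-- B: trans = [0]*ln; for i in indices: if 0 <= i < ln: trans[i] = 1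
def indices_to_trans_alt (indices : List Int) (ln : Int) : List Int :=
  indices.foldl
    (fun trans i => if 0 ≤ i ∧ i < ln then trans.set i.toNat 1 else trans)
    (List.replicate ln.toNat 0)

-- ===== PRECONDITION & SPEC =====
def Spec_indices_to_trans (indices : List Int) (ln : Int) (out : List Int) : Prop := out = indices_to_trans_alt indices ln
instance (indices : List Int) (ln : Int) (out : List Int) : Decidable (Spec_indices_to_trans indices ln out) := by unfold Spec_indices_to_trans; infer_instance

-- ===== CLAIM (what is proved, stated in full; the proofs are below) =====
def Claim_equal_indices_to_trans : Prop := ∀ (indices : List Int) (ln : Int), Dom_indices_to_trans indices ln → Spec_indices_to_trans indices ln (indices_to_trans indices ln)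

-- ===== LEMMAS AND PROOFS =====

-- A's append-fold over a list is the map of the per-element value.
theorem foldl_append_map (l : List Int) (f : Int → Int) (acc : List Int) :
    l.foldl (fun trans each => trans ++ [f each]) acc = acc ++ l.map f := by
  induction l generalizing acc with
  | nil => simp
  | cons x xs ih => simp [List.foldl, ih, List.append_assoc]

-- A's result is pointwise: slot j carries 1 iff j ∈ indices.
theorem portA_eq_map (indices : List Int) (ln : Int) :
    indices_to_trans indices ln =
      (List.range ln.toNat).map (fun (j : Nat) => if ((j : Int) ∈ indices) then (1 : Int) else 0) := by
  unfold indices_to_trans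
  rw [foldl_append_map, PySem.List.pyRange_one]
  simp

-- B's scatter fold preserves length.
theorem scatter_length (ln : Int) (idxs : List Int) (L : List Int) :
    (idxs.foldl (fun trans i => if 0 ≤ i ∧ i < ln then trans.set i.toNat 1 else trans) L).length
      = L.length := by
  induction idxs generalizing L with
  | nil => rfl
  | cons x xs ih =>
      simp only [List.foldl]
      rw [ih]
      split <;> simp

-- B's scatter fold, pointwise: slot j becomes 1 if some in-range index hits it.
theorem scatter_get (ln : Int) (idxs : List Int) (L : List Int) (j : Nat) (hj : j < L.length) :
    (idxs.foldl (fun trans i => if 0 ≤ i ∧ i < ln then trans.set i.toNat 1 else trans) L).getD j 0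
      = if ((j : Int) ∈ idxs ∧ (j : Int) < ln) then 1 else L.getD j 0 := by
  induction idxs generalizing L with
  | nil => simp
  | cons x xs ih =>
      simp only [List.foldl]
      rw [ih _ (by split <;> simp [hj])]
      by_cases hr : (j : Int) ∈ xs ∧ (j : Int) < ln
      · rw [if_pos hr, if_pos ⟨List.mem_cons_of_mem _ hr.1, hr.2⟩]
      · rw [if_neg hr]
        by_cases hx : 0 ≤ x ∧ x < ln
        · rw [if_pos hx]
          by_cases he : (j : Int) = x
          · rw [if_pos ⟨by simp [he], by omega⟩]
            have hx' : x.toNat = j := by omega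
            simp [List.getD, hx', hj]
          · rw [if_neg (by
              intro ⟨hm, hl⟩
              rcases List.mem_cons.mp hm with h | h
              · exact he h
              · exact hr ⟨h, hl⟩)]
            have hx' : x.toNat ≠ j := by omega
            simp [List.getD, hx']
        · rw [if_neg hx, if_neg (by
            intro ⟨hm, hl⟩
            rcases List.mem_cons.mp hm with h | h
            · exact hx ⟨by omega, by omega⟩
            · exact hr ⟨h, hl⟩)]

theorem portB_eq_map (indices : List Int) (ln : Int) :
    indices_to_trans_alt indices ln =
      (List.range ln.toNat).map (fun (j : Nat) => if ((j : Int) ∈ indices) then (1 : Int) else 0) := by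
  unfold indices_to_trans_alt
  apply List.ext_getElem
  · rw [scatter_length]; simp
  · intro j h1 h2
    have hj : j < (List.replicate ln.toNat (0 : Int)).length := by
      rw [scatter_length] at h1; exact h1
    have hjn : j < ln.toNat := by simpa using hj
    rw [← List.getD_eq_getElem _ 0 h1, scatter_get ln indices _ j hj]
    have hlt : (j : Int) < ln := by omega
    simp [List.getElem_map, hlt]

-- ===== VERDICT (by name: the statement is the Claim_ definition above) =====
theorem indices_to_trans_spec : Claim_equal_indices_to_trans := by
  intro indices ln _
  unfold Spec_indices_to_trans
  rw [portA_eq_map, portB_eq_map]
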